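-- pv_equiv track=rewrite | github.com/HallowSiddharth/Codeforces_Python_Solutions | A_Double_Cola.py | finddiv
-- ===== SOURCE A (Python) =====
-- def finddiv(n):
--     div=0
--     before=0
--     while n>0:
--         div+=1
--         before=n
--         n-= 2**(div-1)*5
--     return [div,before]
-- ===== SOURCE B (Python) =====
-- def finddiv(n):
--     # closed form: after k rounds the total removed is 5*(2**k - 1);
--     # div is the least k >= 1 with 5*(2**k - 1) >= n, found by bit_length.
--     if n <= 0:
--         return [0, 0]
--     t = (n + 9) // 5              # = ceil((n + 5) / 5)
--     div = (t - 1).bit_length()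
--     return [div, n - 5 * (2 ** (div - 1) - 1)]
-- ===== Notes on version B (the rewrite author's own statement) =====
-- stated objective: alternative
-- what changed: Replaces the subtraction loop by a closed form: div is computed directly as the bit length of ceil(n/5), and before by one power-of-two formula.
import Mathlib
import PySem

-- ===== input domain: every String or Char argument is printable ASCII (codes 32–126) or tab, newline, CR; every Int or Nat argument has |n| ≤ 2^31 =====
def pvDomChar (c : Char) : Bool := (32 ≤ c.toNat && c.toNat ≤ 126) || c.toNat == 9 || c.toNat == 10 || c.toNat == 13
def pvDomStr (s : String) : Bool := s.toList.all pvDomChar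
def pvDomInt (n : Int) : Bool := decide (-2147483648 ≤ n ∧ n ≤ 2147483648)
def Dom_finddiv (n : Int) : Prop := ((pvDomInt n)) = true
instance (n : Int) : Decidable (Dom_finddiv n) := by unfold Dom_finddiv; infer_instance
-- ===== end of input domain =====

-- B replaces A's subtraction loop by a closed form: div = bit_length of ceil(n/5), before by one formula.

-- ===== PORT A =====
-- the while-loop of A, state (div, before, n); each pass: div += 1; before = n; n -= 2**(div-1)*5
def finddivLoop (dv before n : Int) : List Int :=
  if h : 0 < n then
    finddivLoop (dv + 1) n (n - 2 ^ ((dv + 1 - 1).toNat) * 5)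
  else [dv, before]
termination_by n.toNat
decreasing_by
  have h1 : (1 : Int) ≤ 2 ^ ((dv + 1 - 1).toNat) := one_le_pow₀ (by norm_num)
  omega

def finddiv (n : Int) : List Int := finddivLoop 0 0 n

-- ===== PORT B =====
def finddiv_alt (n : Int) : List Int :=
  if n ≤ 0 then [0, 0]
  else
    let t := PySem.Int.floordiv (n + 9) 5
    let dv : Int := PySem.Int.bitLength (t - 1)
    [dv, n - 5 * (2 ^ ((dv - 1).toNat) - 1)]

-- ===== PRECONDITION & SPEC =====
def Spec_finddiv (n : Int) (out : List Int) : Prop := out = finddiv_alt n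
instance (n : Int) (out : List Int) : Decidable (Spec_finddiv n out) := by unfold Spec_finddiv; infer_instance

-- ===== CLAIM (what is proved, stated in full; the proofs are below) =====
def Claim_equal_finddiv : Prop := ∀ (n : Int), Dom_finddiv n → Spec_finddiv n (finddiv n)

-- ===== LEMMAS AND PROOFS =====

-- loop characterisation: with unit M = 5*2^d and c = ceil(n.toNat/M),
-- the loop returns [d + bitLength c, n - M*(2^(bitLength c - 1) - 1)]
theorem finddivLoop_eq (N : Nat) : ∀ (n : Int) (d : Nat) (b : Int), 0 < n → n.toNat ≤ N →
    finddivLoop (d : Int) b n =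
      [(d : Int) + (PySem.Int.bitLength (((n.toNat + 5 * 2 ^ d - 1) / (5 * 2 ^ d) : Nat) : Int) : Int),
       n - 5 * 2 ^ d * (2 ^ (PySem.Int.bitLength (((n.toNat + 5 * 2 ^ d - 1) / (5 * 2 ^ d) : Nat) : Int) - 1) - 1)] := by
  induction N with
  | zero => intro n d b hn hN; omega
  | succ N ih =>
    intro n d b hn hN
    have hM : (0:Nat) < 5 * 2 ^ d := by positivity
    have hMI : (1 : Int) ≤ 2 ^ d := one_le_pow₀ (by norm_num)
    have hcast : (((5 * 2 ^ d : Nat)) : Int) = 5 * 2 ^ d := by push_cast; ring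
    rw [finddivLoop]
    simp only [hn, dif_pos]
    have hexp : ((d : Int) + 1 - 1).toNat = d := by omega
    rw [hexp]
    set c : Nat := (n.toNat + 5 * 2 ^ d - 1) / (5 * 2 ^ d) with hc
    have hcast2 : (((2 : Nat) ^ d : Nat) : Int) = (2 : Int) ^ d := by push_cast; ring
    by_cases hle : n ≤ 5 * 2 ^ d
    · -- one more pass, then exit
      rw [finddivLoop]
      have hstop : ¬ (0 : Int) < n - 2 ^ d * 5 := by omega
      simp only [hstop]
      have hleN : n.toNat ≤ 5 * 2 ^ d := by omega
      have hc1 : c = 1 := by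
        rw [hc]
        exact Nat.div_eq_of_lt_le (by omega) (by omega)
      have hbl : PySem.Int.bitLength ((1 : Nat) : Int) = 1 := by decide
      rw [hc1, hbl]
      norm_num
    · -- n > M: recurse, IH at d+1
      have hgt : 5 * 2 ^ d < n := by omega
      have hgtN : 5 * 2 ^ d < n.toNat := by omega
      have hn' : 0 < n - 2 ^ d * 5 := by omega
      have hN' : (n - 2 ^ d * 5).toNat ≤ N := by omega
      have hIH := ih (n - 2 ^ d * 5) (d + 1) n hn' hN'
      rw [show ((d + 1 : Nat) : Int) = (d : Int) + 1 by push_cast; ring] at hIH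
      rw [hIH]
      have hpow : (2 : Nat) ^ (d + 1) = 2 * 2 ^ d := by rw [pow_succ]; ring
      have h1 : (n - 2 ^ d * 5).toNat = n.toNat - 5 * 2 ^ d := by omega
      have hnum : (n - 2 ^ d * 5).toNat + 5 * 2 ^ (d + 1) - 1 = n.toNat + 5 * 2 ^ d - 1 := by
        rw [h1, hpow]; omega
      have hc' : ((n - 2 ^ d * 5).toNat + 5 * 2 ^ (d + 1) - 1) / (5 * 2 ^ (d + 1)) = c / 2 := by
        rw [hnum, hc, show 5 * 2 ^ (d + 1) = 5 * 2 ^ d * 2 by rw [hpow]; ring,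
          ← Nat.div_div_eq_div_mul]
      have hc2 : 2 ≤ c := by
        rw [hc, Nat.le_div_iff_mul_le hM]; omega
      have hcpos : 0 < c := by omega
      have hbl : PySem.Int.bitLength (c : Int)
          = PySem.Int.bitLength ((c / 2 : Nat) : Int) + 1 := PySem.Int.bitLength_natCast hcpos
      have h12 : 0 < c / 2 := by omega
      rw [hc', hbl]
      set L := PySem.Int.bitLength ((c / 2 : Nat) : Int) with hLdef
      have hL1 : 1 ≤ L := by
        rw [hLdef, PySem.Int.bitLength_natCast h12]; omega
      obtain ⟨L', hL'⟩ : ∃ L', L = L' + 1 := ⟨L - 1, by omega⟩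
      rw [hL']
      simp only [List.cons.injEq, and_true, Nat.add_sub_cancel]
      constructor
      · push_cast; ring
      · rw [pow_succ (2:Int) L']
        ring

-- closed form for B's t: for 0 < n, (n+9)//5 - 1 = (n.toNat + 4) / 5 (Nat ceiling division of n by 5)
theorem t_eq (n : Int) (hn : 0 < n) :
    PySem.Int.floordiv (n + 9) 5 - 1 = (((n.toNat + 4) / 5 : Nat) : Int) := by
  rw [PySem.Int.floordiv_eq_ediv_of_pos (by norm_num)]
  omega

-- ===== VERDICT (by name: the statement is the Claim_ definition above) =====
theorem finddiv_spec : Claim_equal_finddiv := by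
  intro n _
  unfold Spec_finddiv finddiv finddiv_alt
  by_cases h : n ≤ 0
  · rw [finddivLoop]
    simp [h, show ¬ (0 : Int) < n by omega]
  · have hn : 0 < n := by omega
    have hmain := finddivLoop_eq n.toNat n 0 0 hn le_rfl
    norm_num at hmain
    simp only [if_neg h]
    rw [hmain, t_eq n hn]
    have hk : ∀ (k : Nat), (((k : Int)) - 1).toNat = k - 1 := by omega
    rw [hk]
    push_cast [Int.toNat_eq_max]
    rfl
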